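-- pv_equiv track=rewrite | github.com/liskos/isakovich2023 | ege23/166.py | f
-- ===== SOURCE A (Python) =====
-- def f(a, b, c):
--     if a > b:
--         return 0
--     if a == b:
--         return 1
--     if c == '**':
--         return f(a + 1, b, '+') + f(a * 2, b, '-')
--     else:
--         return f(a + 1, b, '+') + f(a + 3, b, '**') + f(a * 2, b, '-')
-- ===== SOURCE B (Python) =====
-- def f(a, b, c):
--     # Bottom-up DP over the states a..b-1 (two tables: c == '**' and c != '**').
--     if a > b:
--         return 0
--     if a == b:
--         return 1
--
--     def val(d, m):
--         if m > b:
--             return 0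
--         if m == b:
--             return 1
--         return d.get(m, 0)
--
--     star = {}
--     other = {}
--     for n in range(b - 1, a - 1, -1):
--         up = val(other, n + 1)
--         dbl = val(other, 2 * n)
--         star[n] = up + dbl
--         other[n] = up + val(star, n + 3) + dbl
--     return val(star, a) if c == '**' else val(other, a)
-- ===== Notes on version B (the rewrite author's own statement) =====
-- stated objective: alternative
-- what changed: Replaced A's three-way recursion by a bottom-up dynamic program that fills two tables (state '**' vs other) from b-1 down to a in one pass over that range.
import Mathlib
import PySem

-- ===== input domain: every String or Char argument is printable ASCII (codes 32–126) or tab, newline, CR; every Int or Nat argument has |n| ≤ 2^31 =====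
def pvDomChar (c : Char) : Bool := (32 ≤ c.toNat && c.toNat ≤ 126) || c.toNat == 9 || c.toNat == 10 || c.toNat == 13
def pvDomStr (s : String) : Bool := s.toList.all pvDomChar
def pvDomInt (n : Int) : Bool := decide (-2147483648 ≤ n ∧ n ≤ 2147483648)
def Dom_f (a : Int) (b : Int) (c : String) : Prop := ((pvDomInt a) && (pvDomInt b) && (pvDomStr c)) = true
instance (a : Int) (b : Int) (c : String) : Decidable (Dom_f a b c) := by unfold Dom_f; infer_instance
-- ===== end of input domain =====

-- B replaces A's recursion by a bottom-up DP over the states a..b-1 (a genuinely different algorithm).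

-- ===== PORT A =====
-- A's recursion, transliterated step for step; the fuel argument only makes the same
-- computation total ((b-a).toNat+1 levels always suffice on the inputs where A terminates,
-- each call strictly increases a when 1 ≤ a).
def fFuel (fuel : Nat) (a : Int) (b : Int) (c : String) : Int :=
  match fuel with
  | 0 => 0
  | n + 1 =>
    if a > b then 0
    else if a = b then 1
    else if c = "**" then
      fFuel n (a + 1) b "+" + fFuel n (a * 2) b "-"
    else
      fFuel n (a + 1) b "+" + fFuel n (a + 3) b "**" + fFuel n (a * 2) b "-"

def f (a : Int) (b : Int) (c : String) : Int := fFuel ((b - a).toNat + 1) a b c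

-- ===== PORT B =====
-- the helper `val` of Source B
def bVal (b : Int) (d : PySem.Dict Int Int) (m : Int) : Int :=
  if m > b then 0 else if m = b then 1 else d.getD m 0

-- one iteration of Source B's loop body (state = the pair of dicts (star, other))
def bStep (b : Int) (st : PySem.Dict Int Int × PySem.Dict Int Int) (n : Int) :
    PySem.Dict Int Int × PySem.Dict Int Int :=
  let up := bVal b st.2 (n + 1)
  let dbl := bVal b st.2 (2 * n)
  (st.1.insert n (up + dbl), st.2.insert n (up + bVal b st.1 (n + 3) + dbl))

def f_alt (a : Int) (b : Int) (c : String) : Int :=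
  if a > b then 0
  else if a = b then 1
  else
    let st := (PySem.List.pyRange (b - 1) (a - 1) (-1)).foldl (bStep b)
      (PySem.Dict.empty, PySem.Dict.empty)
    if c = "**" then bVal b st.1 a else bVal b st.2 a

-- ===== PRECONDITION & SPEC =====
-- Pre_ excludes exactly the inputs where A never returns: for a ≤ 0 with a < b the branch
-- f(a*2, …) recurses forever (a*2 ≤ a stays ≤ 0 and below b), so Python A raises RecursionError.
def Pre_f (a : Int) (b : Int) (c : String) : Prop := b ≤ a ∨ 1 ≤ a
instance (a : Int) (b : Int) (c : String) : Decidable (Pre_f a b c) := by unfold Pre_f; infer_instance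

def pvWitness_f : Int × Int × String := (1, 6, "**")

def Spec_f (a : Int) (b : Int) (c : String) (out : Int) : Prop := out = f_alt a b c
instance (a : Int) (b : Int) (c : String) (out : Int) : Decidable (Spec_f a b c out) := by unfold Spec_f; infer_instance

-- ===== CLAIM (what is proved, stated in full; the proofs are below) =====
def Claim_equal_f : Prop := ∀ (a : Int) (b : Int) (c : String), Dom_f a b c → Pre_f a b c → Spec_f a b c (f a b c)

-- ===== LEMMAS AND PROOFS =====

-- A's recursion only looks at whether c is "**"; both "+" and "-" take the same branch.
theorem fFuel_notStar (fuel : Nat) (a b : Int) (c₁ c₂ : String)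
    (h1 : c₁ ≠ "**") (h2 : c₂ ≠ "**") : fFuel fuel a b c₁ = fFuel fuel a b c₂ := by
  cases fuel <;> simp [fFuel, h1, h2]

-- fuel irrelevance: any fuel above the depth bound gives the same value (for 1 ≤ a)
theorem fFuel_fuel_eq : ∀ (f1 : Nat) {f2 : Nat} {a b : Int} (c : String),
    1 ≤ a → (b - a).toNat < f1 → (b - a).toNat < f2 →
    fFuel f1 a b c = fFuel f2 a b c := by
  intro f1
  induction f1 with
  | zero => intro f2 a b c _ h1 _; omega
  | succ n ih =>
    intro f2 a b c ha h1 h2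
    cases f2 with
    | zero => omega
    | succ m =>
      by_cases hgt : a > b
      · simp [fFuel, hgt]
      · by_cases heq : a = b
        · simp [fFuel, heq]
        · have hlt : a < b := by omega
          have e1 : fFuel n (a + 1) b "+" = fFuel m (a + 1) b "+" :=
            ih "+" (by omega) (by omega) (by omega)
          have e2 : fFuel n (a * 2) b "-" = fFuel m (a * 2) b "-" :=
            ih "-" (by omega) (by omega) (by omega)
          have e3 : fFuel n (a + 3) b "**" = fFuel m (a + 3) b "**" :=
            ih "**" (by omega) (by omega) (by omega)
          simp only [fFuel, if_neg (by omega : ¬ a > b), if_neg heq]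
          rw [e1, e2, e3]

-- the canonical ("enough fuel") values of A's two kinds of states
def gS (b n : Int) : Int := fFuel ((b - n).toNat + 1) n b "**"
def gO (b n : Int) : Int := fFuel ((b - n).toNat + 1) n b "+"

-- boundary-handling versions (exactly the shape bVal takes on a correct table)
def BS (b m : Int) : Int := if m > b then 0 else if m = b then 1 else gS b m
def BO (b m : Int) : Int := if m > b then 0 else if m = b then 1 else gO b m

-- collapse a child call at fuel (b-n).toNat to its canonical value
theorem fFuel_child (b n m : Int) (c : String) (hc : c ≠ "**")
    (h1 : 1 ≤ n) (hn : n < b) (hm : n < m) :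
    fFuel ((b - n).toNat) m b c = BO b m := by
  obtain ⟨t, ht⟩ : ∃ t, (b - n).toNat = t + 1 := ⟨(b - n).toNat - 1, by omega⟩
  unfold BO
  by_cases hgt : m > b
  · simp [ht, fFuel, hgt]
  · by_cases heq : m = b
    · simp [ht, fFuel, heq]
    · rw [if_neg hgt, if_neg heq]
      have := fFuel_fuel_eq ((b - n).toNat) (f2 := (b - m).toNat + 1) (a := m) (b := b) c
        (by omega) (by omega) (by omega)
      rw [this, gO, fFuel_notStar _ _ _ c "+" hc (by decide)]

theorem fFuel_child_star (b n m : Int) (h1 : 1 ≤ n) (hn : n < b) (hm : n < m) :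
    fFuel ((b - n).toNat) m b "**" = BS b m := by
  obtain ⟨t, ht⟩ : ∃ t, (b - n).toNat = t + 1 := ⟨(b - n).toNat - 1, by omega⟩
  unfold BS
  by_cases hgt : m > b
  · simp [ht, fFuel, hgt]
  · by_cases heq : m = b
    · simp [ht, fFuel, heq]
    · rw [if_neg hgt, if_neg heq]
      exact fFuel_fuel_eq ((b - n).toNat) (f2 := (b - m).toNat + 1) (a := m) (b := b) "**"
        (by omega) (by omega) (by omega)

-- the two one-step equations of A's recursion, in canonical form
-- one-step unfolding of fFuel (rfl, stated for controlled rewriting)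
theorem fFuel_succ (n : Nat) (a b : Int) (c : String) :
    fFuel (n + 1) a b c =
      (if a > b then 0
       else if a = b then 1
       else if c = "**" then fFuel n (a + 1) b "+" + fFuel n (a * 2) b "-"
       else fFuel n (a + 1) b "+" + fFuel n (a + 3) b "**" + fFuel n (a * 2) b "-") := rfl

theorem gS_step (b n : Int) (h1 : 1 ≤ n) (hn : n < b) :
    gS b n = BO b (n + 1) + BO b (2 * n) := by
  unfold gS
  have h2 : (b - n).toNat + 1 = ((b - n).toNat - 1 + 1) + 1 := by omega
  rw [h2, fFuel_succ, if_neg (show ¬ n > b by omega), if_neg (show ¬ n = b by omega),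
      if_pos (rfl : ("**" : String) = "**")]
  have h3 : (b - n).toNat - 1 + 1 = (b - n).toNat := by omega
  rw [h3, fFuel_child b n (n + 1) "+" (by decide) h1 hn (by omega),
      fFuel_child b n (n * 2) "-" (by decide) h1 hn (by omega),
      show n * 2 = 2 * n from by ring]

theorem gO_step (b n : Int) (h1 : 1 ≤ n) (hn : n < b) :
    gO b n = BO b (n + 1) + BS b (n + 3) + BO b (2 * n) := by
  unfold gO
  have h2 : (b - n).toNat + 1 = ((b - n).toNat - 1 + 1) + 1 := by omega
  rw [h2, fFuel_succ, if_neg (show ¬ n > b by omega), if_neg (show ¬ n = b by omega),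
      if_neg (show ¬ ("+" : String) = "**" by decide)]
  have h3 : (b - n).toNat - 1 + 1 = (b - n).toNat := by omega
  rw [h3, fFuel_child b n (n + 1) "+" (by decide) h1 hn (by omega),
      fFuel_child b n (n * 2) "-" (by decide) h1 hn (by omega),
      fFuel_child_star b n (n + 3) h1 hn (by omega),
      show n * 2 = 2 * n from by ring]

-- the DP state after the first j loop iterations (n running b-1, b-2, …, b-j)
def dp (b : Int) (j : Nat) : PySem.Dict Int Int × PySem.Dict Int Int :=
  ((List.range j).map (fun i : Nat => b - 1 - (i : Int))).foldl (bStep b)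
    (PySem.Dict.empty, PySem.Dict.empty)

-- loop invariant: the tables hold the canonical values on every state already processed
theorem dp_inv (b : Int) : ∀ (j : Nat), (j : Int) ≤ b - 1 →
    ∀ m : Int, b - j ≤ m → m < b →
      (dp b j).1.getD m 0 = gS b m ∧ (dp b j).2.getD m 0 = gO b m := by
  intro j
  induction j with
  | zero => intro _ m hm1 hm2; simp only [Nat.cast_zero, sub_zero] at hm1; omega
  | succ j ih =>
    intro hj m hm1 hm2
    have hj' : (j : Int) ≤ b - 1 := by push_cast at hj ⊢; omega
    have hdp : dp b (j + 1) = bStep b (dp b j) (b - 1 - (j : Int)) := by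
      unfold dp
      rw [List.range_succ, List.map_append, List.foldl_append]
      rfl
    have hn1 : (1 : Int) ≤ b - 1 - (j : Int) := by push_cast at hj; omega
    have hnb : b - 1 - (j : Int) < b := by omega
    -- the loop body only reads states strictly above b-1-j, which the invariant covers
    have hreadO : ∀ m' : Int, b - 1 - (j : Int) < m' → bVal b (dp b j).2 m' = BO b m' := by
      intro m' hm'
      unfold bVal BO
      by_cases hA : m' > b
      · simp [hA]
      · by_cases hB : m' = b
        · simp [hB]
        · rw [if_neg hA, if_neg hB, if_neg hA, if_neg hB]
          exact (ih hj' m' (by omega) (by omega)).2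
    have hreadS : ∀ m' : Int, b - 1 - (j : Int) < m' → bVal b (dp b j).1 m' = BS b m' := by
      intro m' hm'
      unfold bVal BS
      by_cases hA : m' > b
      · simp [hA]
      · by_cases hB : m' = b
        · simp [hB]
        · rw [if_neg hA, if_neg hB, if_neg hA, if_neg hB]
          exact (ih hj' m' (by omega) (by omega)).1
    rw [hdp]
    by_cases hmn : m = b - 1 - (j : Int)
    · unfold bStep
      rw [hmn]
      simp only [PySem.Dict.getD_insert_self]
      constructor
      · rw [hreadO (b - 1 - (j : Int) + 1) (by omega), hreadO (2 * (b - 1 - (j : Int))) (by omega),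
            gS_step b (b - 1 - (j : Int)) hn1 hnb]
      · rw [hreadO (b - 1 - (j : Int) + 1) (by omega), hreadO (2 * (b - 1 - (j : Int))) (by omega),
            hreadS (b - 1 - (j : Int) + 3) (by omega), gO_step b (b - 1 - (j : Int)) hn1 hnb]
    · unfold bStep
      simp only []
      rw [PySem.Dict.getD_insert, if_neg hmn, PySem.Dict.getD_insert, if_neg hmn]
      refine ih hj' m ?_ hm2
      push_cast at hm1
      omega

-- ===== VERDICT (by name: the statement is the Claim_ definition above) =====
theorem f_spec : Claim_equal_f := by
  intro a b c _ hpre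
  unfold Spec_f f f_alt
  by_cases hgt : a > b
  · simp [fFuel, hgt]
  · by_cases heq : a = b
    · simp [fFuel, heq]
    · have ha : 1 ≤ a := by
        rcases hpre with h | h
        · omega
        · exact h
      have hab : a < b := by omega
      rw [if_neg hgt, if_neg heq]
      have hrange : PySem.List.pyRange (b - 1) (a - 1) (-1)
          = (List.range ((b - a).toNat)).map (fun i : Nat => b - 1 - (i : Int)) := by
        rw [PySem.List.pyRange_neg_one]
        have ht : (b - 1 - (a - 1)).toNat = (b - a).toNat := by omega
        rw [ht]
      have hinv := dp_inv b ((b - a).toNat) (by omega) a (by omega) hab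
      unfold dp at hinv
      rw [hrange]
      by_cases hc : c = "**"
      · rw [if_pos hc, hc]
        unfold bVal
        rw [if_neg hgt, if_neg heq, hinv.1]
        rfl
      · rw [if_neg hc]
        unfold bVal
        rw [if_neg hgt, if_neg heq, hinv.2, gO]
        exact fFuel_notStar _ _ _ c "+" hc (by decide)
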